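-- pv_equiv track=rewrite | github.com/wsprague-nu/doranet | doranet/strategies.py | calc_batch_split
-- ===== SOURCE A (Python) =====
-- import collections.abc
-- import itertools
-- import math
--
-- def calc_batch_split(
--     size_bundle: collections.abc.Sequence[int], batch_size: int
-- ) -> tuple[int, ...]:
--     num_split = list(itertools.repeat(1, len(size_bundle)))
--     split_size = tuple(size_bundle)
--     while math.prod(split_size) > batch_size:
--         max_index = max(range(len(split_size)), key=split_size.__getitem__)
--         num_split[max_index] += 1
--         split_size = tuple(
--             -(num_mols // -splitnum)
--             for num_mols, splitnum in zip(size_bundle, num_split, strict=False)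
--         )
--     return tuple(num_split)
-- ===== SOURCE B (Python) =====
-- import math
--
--
-- def _insert_asc(order, item):
--     lo, hi = 0, len(order)
--     while lo < hi:
--         mid = (lo + hi) // 2
--         if order[mid] < item:
--             lo = mid + 1
--         else:
--             hi = mid
--     order.insert(lo, item)
--
--
-- def calc_batch_split(size_bundle, batch_size):
--     num_split = [1] * len(size_bundle)
--     order = sorted((-v, i) for i, v in enumerate(size_bundle))
--     prod = math.prod(size_bundle)
--     while prod > batch_size:
--         negv, i = order.pop(0)
--         k = num_split[i] + 1
--         num_split[i] = k
--         nv = -(size_bundle[i] // -k)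
--         prod = prod // -negv * nv
--         _insert_asc(order, (-nv, i))
--     return tuple(num_split)
-- ===== Notes on version B (the rewrite author's own statement) =====
-- stated objective: alternative
-- what changed: B replaces A's per-iteration full argmax scan over the tuple and full product recomputation by a sorted worklist of (-value, index) pairs (pop the head = A's first argmax, binary-search re-insert of the single changed pair) with the product maintained incrementally by one exact division and one multiplication per step.
import Mathlib
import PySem

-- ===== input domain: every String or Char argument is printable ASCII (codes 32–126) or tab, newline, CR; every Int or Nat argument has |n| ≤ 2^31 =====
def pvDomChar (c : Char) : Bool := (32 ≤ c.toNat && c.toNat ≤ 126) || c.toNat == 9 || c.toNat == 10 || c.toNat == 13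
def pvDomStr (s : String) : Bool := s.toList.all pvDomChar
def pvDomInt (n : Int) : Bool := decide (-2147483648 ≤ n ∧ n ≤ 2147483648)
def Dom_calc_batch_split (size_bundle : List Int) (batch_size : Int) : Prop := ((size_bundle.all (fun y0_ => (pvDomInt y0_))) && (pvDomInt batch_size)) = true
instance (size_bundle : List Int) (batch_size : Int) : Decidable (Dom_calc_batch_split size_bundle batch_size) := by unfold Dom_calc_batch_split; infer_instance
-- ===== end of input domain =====

-- B replaces A's per-iteration full argmax scan and full product recomputation by a
-- sorted worklist of (-value, index) pairs (pop the first = A's first argmax, re-insert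
-- the one changed pair in order) and an incrementally maintained product (one exact
-- division and one multiplication per step instead of re-multiplying the whole tuple).
-- Equivalence of the RETURN value is proved on Pre_, exactly the inputs where A terminates
-- without raising.

-- ===== PORT A =====
-- ceiling division, A's `-(num_mols // -splitnum)` (exact: PySem.Int.floordiv is Python //)
def pvCeil (a b : Int) : Int := -(PySem.Int.floordiv a (-b))

-- `max(range(len(xs)), key=xs.__getitem__)`: first index attaining the maximum.
-- Python raises ValueError on an empty list (then xs.length = 0, the fold returns 0);
-- that case is excluded by Pre_.  Indices produced by range are in range, so getD is exact.
def pvArgmax (xs : List Int) : Nat :=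
  (List.range xs.length).foldl (fun best j => if xs.getD j 0 > xs.getD best 0 then j else best) 0

-- the while loop of A, with a fuel bound (totality guard only; on Pre_ inputs the loop
-- stops by its own condition before fuel runs out)
def pvLoopA (size_bundle : List Int) (batch_size : Int) :
    Nat → List Int → List Int → List Int
  | 0, num, _ => num
  | fuel+1, num, split =>
    if split.prod > batch_size then
      let j := pvArgmax split
      let num' := num.set j (num.getD j 0 + 1)
      let split' := List.zipWith (fun s k => pvCeil s k) size_bundle num'
      pvLoopA size_bundle batch_size fuel num' split'
    else num

-- fuel: enough steps for every terminating run (Σ|sᵢ| + n + 1)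
def pvFuel (size_bundle : List Int) : Nat :=
  (size_bundle.map Int.natAbs).sum + size_bundle.length + 1

def calc_batch_split (size_bundle : List Int) (batch_size : Int) : List Int :=
  pvLoopA size_bundle batch_size (pvFuel size_bundle)
    (List.replicate size_bundle.length 1) size_bundle

-- ===== PORT B =====
-- Python tuple comparison `order[j] < item` on the (Int × Int) pairs: lexicographic
def pvPairLt (x y : Int × Int) : Bool := x.1 < y.1 || (x.1 == y.1 && x.2 < y.2)

-- the binary search of _insert_asc: first position whose element is not < item
-- ((lo+hi)//2 on nonnegative ints is Nat division; order[mid] is in range since mid < hi ≤ len)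
def pvBisect (order : List (Int × Int)) (item : Int × Int) (lo hi : Nat) : Nat :=
  if lo < hi then
    let mid := (lo + hi) / 2
    if pvPairLt (order.getD mid (0, 0)) item then pvBisect order item (mid + 1) hi
    else pvBisect order item lo mid
  else lo
termination_by hi - lo
decreasing_by all_goals omega

-- _insert_asc: binary-search the position, then list.insert there
def pvInsertAsc (order : List (Int × Int)) (item : Int × Int) : List (Int × Int) :=
  PySem.List.insert order ((pvBisect order item 0 order.length : Nat) : Int) item


-- the while loop of B, same fuel guard; all list indices i come from enumerate, hence are
-- nonnegative and in range (pyGetD/pySetD are exact there); `order = []` with the loop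
-- condition true is Python's IndexError from order.pop(0), excluded by Pre_
def pvLoopB (size_bundle : List Int) (batch_size : Int) :
    Nat → List Int → List (Int × Int) → Int → List Int
  | 0, num, _, _ => num
  | fuel+1, num, order, prod =>
    if prod > batch_size then
      match order with
      | [] => num
      | (negv, i) :: rest =>
        let k := PySem.List.pyGetD num i 0 + 1
        let num' := PySem.List.pySetD num i k
        let nv := pvCeil (PySem.List.pyGetD size_bundle i 0) k
        let prod' := PySem.Int.floordiv prod (-negv) * nv
        pvLoopB size_bundle batch_size fuel num' (pvInsertAsc rest (-nv, i)) prod'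
    else num

def calc_batch_split_alt (size_bundle : List Int) (batch_size : Int) : List Int :=
  -- order = sorted((-v, i) for i, v in enumerate(size_bundle)): Python's tuple order is lexicographic
  pvLoopB size_bundle batch_size (pvFuel size_bundle)
    (List.replicate size_bundle.length 1)
    (PySem.List.sorted
      ((PySem.List.enumerate size_bundle).map (fun p => (-p.2, p.1))) (fun q => toLex q) false)
    size_bundle.prod

-- ===== PRECONDITION & SPEC =====
-- Pre_ is exactly where Python A returns: either the initial product is already ≤ batch_size
-- (the loop never runs), or the loop runs and terminates — which happens precisely when the
-- bundle is nonempty and either (some entry ≥ 1 and the product C of the nonpositive entries,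
-- which the greedy never splits, satisfies 0 < C ≤ batch_size) or (all entries ≤ 0 and
-- 0 ≤ batch_size).  Outside Pre_ Python A raises ValueError (empty bundle) or loops forever.
def Pre_calc_batch_split (size_bundle : List Int) (batch_size : Int) : Prop :=
  size_bundle.prod ≤ batch_size ∨
  (size_bundle ≠ [] ∧
    (((∃ s ∈ size_bundle, 1 ≤ s) ∧
        0 < (size_bundle.filter (fun s => decide (s ≤ 0))).prod ∧
        (size_bundle.filter (fun s => decide (s ≤ 0))).prod ≤ batch_size) ∨
     ((∀ s ∈ size_bundle, s ≤ 0) ∧ 0 ≤ batch_size)))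
instance (size_bundle : List Int) (batch_size : Int) : Decidable (Pre_calc_batch_split size_bundle batch_size) := by unfold Pre_calc_batch_split; infer_instance

def pvWitness_calc_batch_split : List Int × Int := ([3, 2], 4)

def Spec_calc_batch_split (size_bundle : List Int) (batch_size : Int) (out : List Int) : Prop := out = calc_batch_split_alt size_bundle batch_size
instance (size_bundle : List Int) (batch_size : Int) (out : List Int) : Decidable (Spec_calc_batch_split size_bundle batch_size out) := by unfold Spec_calc_batch_split; infer_instance

-- ===== CLAIM (what is proved, stated in full; the proofs are below) =====
def Claim_equal_calc_batch_split : Prop := ∀ (size_bundle : List Int) (batch_size : Int), Dom_calc_batch_split size_bundle batch_size → Pre_calc_batch_split size_bundle batch_size → Spec_calc_batch_split size_bundle batch_size (calc_batch_split size_bundle batch_size)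

-- ===== LEMMAS AND PROOFS =====

-- the multiset of (-value, index) pairs of a split list
def pvPairs (split : List Int) : List (Int × Int) :=
  (PySem.List.enumerate split).map (fun p => (-p.2, p.1))

-- the loop invariant tying A's state (num, split) to B's state (num, order, prod)
def pvInv (l : List Int) (num split : List Int) (order : List (Int × Int)) (prod : Int) : Prop :=
  num.length = l.length ∧
  (∀ k ∈ num, 1 ≤ k) ∧
  split = List.zipWith (fun s k => pvCeil s k) l num ∧
  prod = split.prod ∧
  order.Perm (pvPairs split) ∧
  order.Pairwise (fun a b => toLex a ≤ toLex b)

-- the part of Pre_ used inside the loop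
def pvP2 (l : List Int) (B : Int) : Prop :=
  l ≠ [] ∧ ((∃ s ∈ l, 1 ≤ s) ∨ (∀ s ∈ l, s ≤ 0) ∧ 0 ≤ B)


theorem pvCeil_eq_iff {s k q : Int} (hk : 0 < k) : pvCeil s k = q ↔ (q - 1) * k < s ∧ s ≤ q * k := by
  rw [pvCeil, show PySem.Int.floordiv s (-k) = PySem.Int.floordiv (-s) k from by
    rw [← PySem.Int.floordiv_neg_neg (-s) k]; simp]
  exact PySem.Int.neg_floordiv_neg_eq_iff_of_pos hk

theorem pvCeil_one (s : Int) : pvCeil s 1 = s := by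
  rw [pvCeil_eq_iff (by norm_num)]; omega

theorem pvCeil_pos {s k : Int} (hs : 1 ≤ s) (hk : 1 ≤ k) : 1 ≤ pvCeil s k := by
  have h := (pvCeil_eq_iff (q := pvCeil s k) (by omega : (0:Int) < k)).mp rfl
  by_contra hq
  have hq' : pvCeil s k ≤ 0 := by omega
  have : pvCeil s k * k ≤ 0 := mul_nonpos_of_nonpos_of_nonneg hq' (by omega)
  omega

theorem pvFloordiv_exact (a b : Int) (hb : b ≠ 0) (h : b ∣ a) :
    PySem.Int.floordiv a b = a / b := by
  have h1 := PySem.Int.floordiv_mul_add_mod a b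
  have h2 : PySem.Int.mod a b = 0 := (PySem.Int.mod_eq_zero_iff_dvd a b).mpr h
  rw [h2, add_zero] at h1
  conv_rhs => rw [← h1]
  exact (Int.mul_ediv_cancel _ hb).symm

theorem pvArgmax_aux (xs : List Int) (n : Nat) (hn : 0 < n) (hlen : n ≤ xs.length) :
    ((List.range n).foldl (fun best j => if xs.getD j 0 > xs.getD best 0 then j else best) 0) < n ∧
    (∀ m < n, xs.getD m 0 ≤ xs.getD ((List.range n).foldl (fun best j => if xs.getD j 0 > xs.getD best 0 then j else best) 0) 0) ∧
    (∀ m < ((List.range n).foldl (fun best j => if xs.getD j 0 > xs.getD best 0 then j else best) 0),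
      xs.getD m 0 < xs.getD ((List.range n).foldl (fun best j => if xs.getD j 0 > xs.getD best 0 then j else best) 0) 0) := by
  induction n with
  | zero => omega
  | succ n ih =>
    rw [List.range_succ, List.foldl_append]
    by_cases hn0 : n = 0
    · subst hn0
      simp only [List.range_zero, List.foldl_nil, List.foldl_cons]
      constructor
      · split <;> omega
      constructor
      · intro m hm; interval_cases m
        split <;> simp
      · intro m hm; split at hm <;> omega
    · obtain ⟨ih1, ih2, ih3⟩ := ih (by omega) (by omega)
      set u := (List.range n).foldl (fun best j => if xs.getD j 0 > xs.getD best 0 then j else best) 0 with hu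
      simp only [List.foldl_cons, List.foldl_nil]
      by_cases hgt : xs.getD n 0 > xs.getD u 0
      · rw [if_pos hgt]
        refine ⟨by omega, ?_, ?_⟩
        · intro m hm
          rcases Nat.lt_succ_iff_lt_or_eq.mp hm with h | h
          · exact le_of_lt (lt_of_le_of_lt (ih2 m h) hgt)
          · subst h; rfl
        · intro m hm
          rcases Nat.lt_or_ge m u with h | h
          · exact lt_trans (ih3 m h) hgt
          · calc xs.getD m 0 ≤ xs.getD u 0 := ih2 m (by omega)
              _ < xs.getD n 0 := hgt
      · rw [if_neg hgt]
        refine ⟨by omega, ?_, ih3⟩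
        intro m hm
        rcases Nat.lt_succ_iff_lt_or_eq.mp hm with h | h
        · exact ih2 m h
        · subst h; omega

theorem pvArgmax_spec (xs : List Int) (h : xs ≠ []) :
    pvArgmax xs < xs.length ∧
    (∀ m < xs.length, xs.getD m 0 ≤ xs.getD (pvArgmax xs) 0) ∧
    (∀ m < pvArgmax xs, xs.getD m 0 < xs.getD (pvArgmax xs) 0) :=
  pvArgmax_aux xs xs.length (List.length_pos_iff.mpr h) le_rfl
theorem pvPairLt_iff (x y : Int × Int) : pvPairLt x y = true ↔ toLex x < toLex y := by
  simp [pvPairLt, Prod.Lex.lt_iff]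

theorem pvPairs_length (split : List Int) : (pvPairs split).length = split.length := by
  simp [pvPairs, PySem.List.length_enumerate]

theorem pvPairs_getElem (split : List Int) (j : Nat) (hj : j < split.length) :
    (pvPairs split)[j]'(by simpa [pvPairs_length] using hj) = (-split[j], (j : Int)) := by
  simp [pvPairs, PySem.List.getElem_enumerate]

theorem pvPairs_mem_iff (split : List Int) (p : Int × Int) :
    p ∈ pvPairs split ↔ ∃ (k : Nat) (hk : k < split.length), p = (-split[k], (k : Int)) := by
  simp only [pvPairs, List.mem_map, PySem.List.mem_enumerate_iff]
  constructor
  · rintro ⟨q, ⟨k, hk, rfl⟩, rfl⟩; exact ⟨k, hk, by simp⟩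
  · rintro ⟨k, hk, rfl⟩; exact ⟨(k, split[k]), ⟨k, hk, by simp⟩, by simp⟩

theorem pvPairs_set (split : List Int) (j : Nat) (v : Int) (hj : j < split.length) :
    pvPairs (split.set j v) = (pvPairs split).set j (-v, (j : Int)) := by
  apply List.ext_getElem
  · simp [pvPairs_length]
  · intro k h1 h2
    rw [pvPairs_getElem _ k (by simpa [pvPairs_length] using h1)]
    by_cases hkj : k = j
    · subst hkj
      rw [List.getElem_set_self (by simpa [pvPairs_length] using hj)]
      simp
    · rw [List.getElem_set_ne (by omega), List.getElem_set_ne (by omega),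
        pvPairs_getElem _ k (by simpa [pvPairs_length] using h2)]

theorem pvBisect_le (order : List (Int × Int)) (item : Int × Int) :
    ∀ lo hi, lo ≤ hi → lo ≤ pvBisect order item lo hi ∧ pvBisect order item lo hi ≤ hi := by
  intro lo hi h
  fun_induction pvBisect order item lo hi with
  | case1 lo hi hlt mid hc ih => obtain ⟨a, b⟩ := ih (by omega); omega
  | case2 lo hi hlt mid hc ih => obtain ⟨a, b⟩ := ih (by omega); omega
  | case3 lo hi hlt => omega

theorem pvBisect_spec (order : List (Int × Int)) (item : Int × Int)
    (hsort : order.Pairwise (fun a b => toLex a ≤ toLex b)) :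
    ∀ lo hi, lo ≤ hi → hi ≤ order.length →
    (∀ m, m < lo → toLex (order.getD m (0,0)) < toLex item) →
    (hi < order.length → ¬ toLex (order.getD hi (0,0)) < toLex item) →
    (∀ m, m < pvBisect order item lo hi → toLex (order.getD m (0,0)) < toLex item) ∧
    (pvBisect order item lo hi < order.length →
      ¬ toLex (order.getD (pvBisect order item lo hi) (0,0)) < toLex item) := by
  intro lo hi hlohi hhi hlow hup
  fun_induction pvBisect order item lo hi with
  | case1 lo hi hlt mid hc ih =>
    apply ih (by omega) hhi
    · intro m hm
      have hmid : toLex (order.getD mid (0,0)) < toLex item := (pvPairLt_iff _ _).mp hc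
      rcases Nat.lt_or_ge m lo with h | h
      · exact hlow m h
      · -- lo ≤ m ≤ mid: use sortedness
        rcases Nat.eq_or_lt_of_le (by omega : m ≤ mid) with rfl | hmlt
        · exact hmid
        · have hmlen : m < order.length := by omega
          have hmidlen : mid < order.length := by omega
          have := (List.pairwise_iff_getElem.mp hsort) m mid hmlen hmidlen hmlt
          rw [List.getD_eq_getElem _ _ hmlen]
          rw [List.getD_eq_getElem _ _ hmidlen] at hmid
          exact lt_of_le_of_lt this hmid
    · exact hup
  | case2 lo hi hlt mid hc ih =>
    apply ih (by omega) (by omega) hlow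
    · exact fun _ => by simpa [pvPairLt_iff] using hc
  | case3 lo hi hlt =>
    have heq : lo = hi := by omega
    subst heq
    exact ⟨fun m hm => hlow m hm, fun hl => hup hl⟩

theorem pvInsertAsc_eq (order : List (Int × Int)) (item : Int × Int) :
    pvInsertAsc order item
      = order.take (pvBisect order item 0 order.length) ++ item :: order.drop (pvBisect order item 0 order.length) := by
  apply PySem.List.insert_natCast
  exact (pvBisect_le order item 0 order.length (Nat.zero_le _)).2

theorem pvInsertAsc_perm (l : List (Int × Int)) (x : Int × Int) :
    (pvInsertAsc l x).Perm (x :: l) := by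
  rw [pvInsertAsc_eq]
  refine List.perm_middle.trans ?_
  rw [List.take_append_drop]

theorem pvInsertAsc_sorted (l : List (Int × Int)) (x : Int × Int)
    (h : l.Pairwise (fun a b => toLex a ≤ toLex b)) :
    (pvInsertAsc l x).Pairwise (fun a b => toLex a ≤ toLex b) := by
  obtain ⟨hlow, hup⟩ := pvBisect_spec l x h 0 l.length (Nat.zero_le _) le_rfl
    (by omega) (by omega)
  obtain ⟨hr0, hrlen⟩ := pvBisect_le l x 0 l.length (Nat.zero_le _)
  set r := pvBisect l x 0 l.length with hr
  rw [pvInsertAsc_eq, List.pairwise_append]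
  refine ⟨h.sublist (List.take_sublist _ _), ?_, ?_⟩
  · rw [List.pairwise_cons]
    refine ⟨?_, h.sublist (List.drop_sublist _ _)⟩
    intro b hb
    obtain ⟨k, hk, hbk⟩ := List.mem_iff_getElem.mp hb
    rw [List.getElem_drop] at hbk
    have hrl : r < l.length := by
      have := hk; rw [List.length_drop] at this; omega
    have hxr : toLex x ≤ toLex (l.getD r (0,0)) := le_of_not_gt (hup hrl)
    rw [List.getD_eq_getElem _ _ hrl] at hxr
    rcases Nat.eq_zero_or_pos k with rfl | hk0
    · rw [← hbk]; simpa using hxr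
    · have hrk : r < r + k := by omega
      have := (List.pairwise_iff_getElem.mp h) r (r + k) hrl (by rw [List.length_drop] at hk; omega) hrk
      rw [← hbk]
      exact le_trans hxr this
  · intro a ha b hb
    obtain ⟨k, hk, hak⟩ := List.mem_iff_getElem.mp ha
    rw [List.length_take] at hk
    have hkr : k < r := by omega
    have hkl : k < l.length := by omega
    rw [List.getElem_take] at hak
    have hax : toLex a < toLex x := by
      rw [← hak]
      have := hlow k hkr
      rwa [List.getD_eq_getElem _ _ hkl] at this
    rcases List.mem_cons.mp hb with rfl | hb'
    · exact le_of_lt hax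
    · obtain ⟨k', hk', hbk'⟩ := List.mem_iff_getElem.mp hb'
      rw [List.getElem_drop] at hbk'
      have := (List.pairwise_iff_getElem.mp h) k (r + k') hkl
        (by rw [List.length_drop] at hk'; omega) (by omega)
      rw [← hak, ← hbk']
      exact this

theorem pvZipWith_set (l num : List Int) (j : Nat) (v : Int)
    (hj : j < l.length) (hj' : j < num.length) :
    List.zipWith (fun s k => pvCeil s k) l (num.set j v)
      = (List.zipWith (fun s k => pvCeil s k) l num).set j (pvCeil (l.getD j 0) v) := by
  induction l generalizing num j with
  | nil => simp at hj
  | cons a l ih =>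
    cases num with
    | nil => simp at hj'
    | cons b num =>
      cases j with
      | zero => simp
      | succ j =>
        simp only [List.set_cons_succ, List.zipWith_cons_cons]
        rw [ih num j (by simpa using hj) (by simpa using hj')]
        simp

theorem pvZipWith_replicate_one (l : List Int) :
    List.zipWith (fun s k => pvCeil s k) l (List.replicate l.length 1) = l := by
  apply List.ext_getElem
  · simp
  · intro k h1 h2
    simp [pvCeil_one]

theorem pvLoopA_succ (l : List Int) (B : Int) (fuel : Nat) (num split : List Int) :
    pvLoopA l B (fuel+1) num split =
      (if split.prod > B then
        pvLoopA l B fuel (num.set (pvArgmax split) (num.getD (pvArgmax split) 0 + 1))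
          (List.zipWith (fun s k => pvCeil s k) l (num.set (pvArgmax split) (num.getD (pvArgmax split) 0 + 1)))
      else num) := rfl

theorem pvLoopB_succ (l : List Int) (B : Int) (fuel : Nat) (num : List Int)
    (order : List (Int × Int)) (prod : Int) :
    pvLoopB l B (fuel+1) num order prod =
      (if prod > B then
        match order with
        | [] => num
        | (negv, i) :: rest =>
          pvLoopB l B fuel (PySem.List.pySetD num i (PySem.List.pyGetD num i 0 + 1))
            (pvInsertAsc rest (-(pvCeil (PySem.List.pyGetD l i 0) (PySem.List.pyGetD num i 0 + 1)), i))
            (PySem.Int.floordiv prod (-negv) * pvCeil (PySem.List.pyGetD l i 0) (PySem.List.pyGetD num i 0 + 1))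
      else num) := rfl

theorem pvLoopB_succ_cons (l : List Int) (B : Int) (fuel : Nat) (num : List Int)
    (negv i : Int) (rest : List (Int × Int)) (prod : Int) :
    pvLoopB l B (fuel+1) num ((negv, i) :: rest) prod =
      (if prod > B then
        pvLoopB l B fuel (PySem.List.pySetD num i (PySem.List.pyGetD num i 0 + 1))
          (pvInsertAsc rest (-(pvCeil (PySem.List.pyGetD l i 0) (PySem.List.pyGetD num i 0 + 1)), i))
          (PySem.Int.floordiv prod (-negv) * pvCeil (PySem.List.pyGetD l i 0) (PySem.List.pyGetD num i 0 + 1))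
      else num) := rfl

-- main simulation: under the invariant, both loops return the same list, step for step
theorem pvLoop_eq (l : List Int) (B : Int) (hP2 : pvP2 l B) :
    ∀ (fuel : Nat) (num split : List Int) (order : List (Int × Int)) (prod : Int),
      pvInv l num split order prod →
      pvLoopA l B fuel num split = pvLoopB l B fuel num order prod := by
  intro fuel
  induction fuel with
  | zero => intro num split order prod _; rfl
  | succ fuel ih =>
    intro num split order prod hInv
    obtain ⟨hlen, hnum1, hsplit, hprod, hperm, hsort⟩ := hInv
    rw [pvLoopA_succ]
    by_cases hcond : split.prod > B
    · rw [if_pos hcond]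
      have hlne : l ≠ [] := hP2.1
      have hsplitlen : split.length = l.length := by
        rw [hsplit, List.length_zipWith, hlen, min_self]
      have hsne : split ≠ [] := by
        intro h
        exact hlne (List.length_eq_zero_iff.mp (by rw [← hsplitlen, h]; rfl))
      obtain ⟨hj, hmax, hfirst⟩ := pvArgmax_spec split hsne
      set j := pvArgmax split with hjdef
      have hjl : j < l.length := by omega
      have hjn : j < num.length := by omega
      -- the head of order is (-split[j], j)
      have horderne : order ≠ [] := by
        intro h
        have := hperm.length_eq
        rw [h, pvPairs_length] at this
        exact hsne (List.length_eq_zero_iff.mp this.symm)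
      obtain ⟨⟨negv, i⟩, rest, horder⟩ := List.exists_cons_of_ne_nil horderne
      have hm_mem : (-split[j], (j : Int)) ∈ pvPairs split :=
        (pvPairs_mem_iff split _).mpr ⟨j, hj, rfl⟩
      have hm_min : ∀ p ∈ pvPairs split, toLex (-split[j], (j : Int)) ≤ toLex p := by
        intro p hp
        obtain ⟨k, hk, rfl⟩ := (pvPairs_mem_iff split p).mp hp
        rw [Prod.Lex.le_iff]
        have hk1 : split.getD k 0 ≤ split.getD j 0 := hmax k hk
        rw [List.getD_eq_getElem _ _ hk, List.getD_eq_getElem _ _ hj] at hk1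
        rcases eq_or_lt_of_le hk1 with heq | hlt
        · right
          refine ⟨by simpa using heq.symm, ?_⟩
          simp only [ofLex_toLex]
          by_contra hki
          have hkj : k < j := by omega
          have := hfirst k hkj
          rw [List.getD_eq_getElem _ _ hk, List.getD_eq_getElem _ _ hj] at this
          omega
        · left; simpa using hlt
      have hhead_min : ∀ p ∈ pvPairs split, toLex (negv, i) ≤ toLex p := by
        intro p hp
        have hp' : p ∈ order := hperm.symm.subset (by exact hp)
        rw [horder] at hp'
        rcases List.mem_cons.mp hp' with rfl | hp''
        · exact le_refl _
        · rw [horder] at hsort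
          exact (List.pairwise_cons.mp hsort).1 p hp''
      have hhead_mem : (negv, i) ∈ pvPairs split := by
        apply hperm.subset
        rw [horder]; exact List.mem_cons_self
      have hhead : ((negv : Int), (i : Int)) = (-split[j], (j : Int)) := by
        have h1 := hhead_min _ hm_mem
        have h2 := hm_min _ hhead_mem
        have := le_antisymm h1 h2
        exact congrArg ofLex this
      have hnegv : negv = -split[j] := (Prod.mk.injEq _ _ _ _ ▸ hhead).1
      have hi : i = (j : Int) := (Prod.mk.injEq _ _ _ _ ▸ hhead).2
      -- both sides update the same entry
      have hgetnum : PySem.List.pyGetD num i 0 = num.getD j 0 := by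
        rw [hi]; exact PySem.List.pyGetD_natCast num j 0
      have hsetnum : PySem.List.pySetD num i (PySem.List.pyGetD num i 0 + 1)
          = num.set j (num.getD j 0 + 1) := by
        rw [hgetnum, hi]; exact PySem.List.pySetD_natCast num j _
      have hgetl : PySem.List.pyGetD l i 0 = l.getD j 0 := by
        rw [hi]; exact PySem.List.pyGetD_natCast l j 0
      rw [horder, pvLoopB_succ_cons, if_pos (by omega), hsetnum, hgetl, hgetnum]
      -- abbreviations for the new state
      set k := num.getD j 0 + 1 with hk
      set nv := pvCeil (l.getD j 0) k with hnv
      set num' := num.set j k with hnum'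
      have hsplit' : List.zipWith (fun s k => pvCeil s k) l num' = split.set j nv := by
        rw [hnum', pvZipWith_set l num j k hjl hjn, ← hsplit]
      -- the popped value is nonzero
      have hv_mem : split[j] ∈ split := List.getElem_mem hj
      have hvne : split[j] ≠ 0 := by
        rcases hP2.2 with ⟨s, hs_mem, hs1⟩ | ⟨hall, hB0⟩
        · obtain ⟨idx, hidx, rfl⟩ := List.mem_iff_getElem.mp hs_mem
          have hidxs : idx < split.length := by omega
          have hidxn : idx < num.length := by omega
          have hsidx : split[idx] = pvCeil l[idx] num[idx] := by
            simp only [hsplit, List.getElem_zipWith]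
          have hnum_idx : 1 ≤ num[idx] := hnum1 _ (List.getElem_mem hidxn)
          have h1 : 1 ≤ split[idx] := by rw [hsidx]; exact pvCeil_pos hs1 hnum_idx
          have h2 := hmax idx hidxs
          rw [List.getD_eq_getElem _ _ hidxs, List.getD_eq_getElem _ _ hj] at h2
          omega
        · intro hzero
          have : split.prod = 0 := List.prod_eq_zero (hzero ▸ hv_mem)
          omega
      -- decompositions of split and split.set j nv
      have hsplit_dec : split.take j ++ split[j] :: split.drop (j+1) = split := by
        conv_rhs => rw [← List.take_append_drop j split]
        rw [List.drop_eq_getElem_cons hj]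
      have hset_dec : split.set j nv = split.take j ++ nv :: split.drop (j+1) := by
        rw [List.set_eq_take_append_cons_drop, if_pos (by omega)]
      have hprod_dec : split.prod = (split.take j).prod * split[j] * (split.drop (j+1)).prod := by
        conv_lhs => rw [← hsplit_dec]
        rw [List.prod_append, List.prod_cons]; ring
      -- the incremental product is exact
      have hprod' : PySem.Int.floordiv (split.prod) (split[j]) * nv = (split.set j nv).prod := by
        have hdvd : split[j] ∣ split.prod := by
          refine ⟨(split.take j).prod * (split.drop (j+1)).prod, ?_⟩
          rw [hprod_dec]; ring
        rw [pvFloordiv_exact _ _ hvne hdvd]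
        obtain ⟨c, hc⟩ := hdvd
        have hx : split[j] * c = split[j] * ((split.take j).prod * (split.drop (j+1)).prod) := by
          rw [← hc, hprod_dec]; ring
        have hcval : (split.take j).prod * (split.drop (j+1)).prod = c :=
          (mul_left_cancel₀ hvne hx).symm
        rw [hc, Int.mul_ediv_cancel_left _ hvne, hset_dec, List.prod_append, List.prod_cons,
          ← hcval]
        ring
      -- permutation bookkeeping
      have hpairs_dec : pvPairs split
          = (pvPairs split).take j ++ (-split[j], (j : Int)) :: (pvPairs split).drop (j+1) := by
        conv_lhs => rw [← List.take_append_drop j (pvPairs split)]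
        rw [List.drop_eq_getElem_cons (by rw [pvPairs_length]; omega), pvPairs_getElem split j hj]
      have hrest : rest.Perm ((pvPairs split).take j ++ (pvPairs split).drop (j+1)) := by
        apply List.Perm.cons_inv (a := (-split[j], (j : Int)))
        have p1 := hperm
        rw [horder, hhead] at p1
        have p2 : (pvPairs split).Perm
            ((-split[j], (j : Int)) :: ((pvPairs split).take j ++ (pvPairs split).drop (j+1))) := by
          nth_rewrite 1 [hpairs_dec]
          exact List.perm_middle
        exact p1.trans p2
      have hperm' : (pvInsertAsc rest (-nv, i)).Perm (pvPairs (split.set j nv)) := by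
        have e2 : pvPairs (split.set j nv)
            = (pvPairs split).take j ++ (-nv, i) :: (pvPairs split).drop (j+1) := by
          rw [pvPairs_set split j nv hj, hi, List.set_eq_take_append_cons_drop,
            if_pos (by rw [pvPairs_length]; omega)]
        refine ((pvInsertAsc_perm rest _).trans ((hrest.cons _).trans ?_))
        rw [e2]
        exact List.perm_middle.symm
      have hsort' : (pvInsertAsc rest (-nv, i)).Pairwise (fun a b => toLex a ≤ toLex b) := by
        apply pvInsertAsc_sorted
        rw [horder] at hsort
        exact (List.pairwise_cons.mp hsort).2
      -- apply the induction hypothesis to the new state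
      rw [hsplit']
      have hneg : -negv = split[j] := by rw [hnegv]; ring
      rw [hneg, hprod, hprod']
      apply ih
      refine ⟨?_, ?_, ?_, rfl, hperm', hsort'⟩
      · rw [hnum', List.length_set, hlen]
      · intro x hx
        rw [hnum', List.set_eq_take_append_cons_drop, if_pos (by omega)] at hx
        rcases List.mem_append.mp hx with hx | hx
        · exact hnum1 x (List.mem_of_mem_take hx)
        · rcases List.mem_cons.mp hx with rfl | hx
          · have : num.getD j 0 = num[j] := List.getD_eq_getElem _ _ hjn
            have := hnum1 num[j] (List.getElem_mem hjn)
            omega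
          · exact hnum1 x (List.mem_of_mem_drop hx)
      · exact hsplit'.symm
    · rw [if_neg hcond, pvLoopB_succ, if_neg (by omega)]

-- ===== VERDICT (by name: the statement is the Claim_ definition above) =====
theorem calc_batch_split_spec : Claim_equal_calc_batch_split := by
  intro l B _ hPre
  unfold Spec_calc_batch_split calc_batch_split calc_batch_split_alt
  by_cases h0 : l.prod ≤ B
  · rw [pvFuel, pvLoopA_succ, pvLoopB_succ, if_neg (by omega), if_neg (by omega)]
  · have hP2 : pvP2 l B := by
      rcases hPre with h | ⟨hne, hcase⟩
      · omega
      · exact ⟨hne, by rcases hcase with ⟨h1, _, _⟩ | ⟨h1, h2⟩; exacts [Or.inl h1, Or.inr ⟨h1, h2⟩]⟩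
    apply pvLoop_eq l B hP2
    refine ⟨by simp, by intro k hk; simp at hk; omega, (pvZipWith_replicate_one l).symm, rfl, ?_, ?_⟩
    · exact PySem.List.sorted_perm _ _ _
    · exact PySem.List.sorted_pairwise _ _
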